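-- pv_equiv track=rewrite | github.com/smearle/script-doctor | llm_agent_loop.py | extract_first_level
-- ===== SOURCE A (Python) =====
-- def extract_first_level(level_lines):
--     """
--     Extract the first level from the LEVELS section.
--
--     Args:
--         level_lines: Lines from the LEVELS section
--
--     Returns:
--         String representation of the first level
--     """
--     levels = []
--     current = []
--     for line in level_lines:
--         if not line.strip():
--             if current:
--                 levels.append(current)
--                 current = []
--         else:
--             current.append(line)
--     if current:
--         levels.append(current)
--     if levels:
--         return "\n".join(levels[0])
--     return ""
-- ===== SOURCE B (Python) =====
-- def extract_first_level(level_lines):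
--     i = 0
--     n = len(level_lines)
--     while i < n and not level_lines[i].strip():
--         i += 1
--     j = i
--     while j < n and level_lines[j].strip():
--         j += 1
--     return "\n".join(level_lines[i:j])
-- ===== Notes on version B (the rewrite author's own statement) =====
-- stated objective: simpler
-- what changed: Instead of accumulating a list of all blank-delimited blocks and joining the first, B skips leading blank lines and takes the following run of non-blank lines directly (drop-while/take-while), never building a levels list.
import Mathlib
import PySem

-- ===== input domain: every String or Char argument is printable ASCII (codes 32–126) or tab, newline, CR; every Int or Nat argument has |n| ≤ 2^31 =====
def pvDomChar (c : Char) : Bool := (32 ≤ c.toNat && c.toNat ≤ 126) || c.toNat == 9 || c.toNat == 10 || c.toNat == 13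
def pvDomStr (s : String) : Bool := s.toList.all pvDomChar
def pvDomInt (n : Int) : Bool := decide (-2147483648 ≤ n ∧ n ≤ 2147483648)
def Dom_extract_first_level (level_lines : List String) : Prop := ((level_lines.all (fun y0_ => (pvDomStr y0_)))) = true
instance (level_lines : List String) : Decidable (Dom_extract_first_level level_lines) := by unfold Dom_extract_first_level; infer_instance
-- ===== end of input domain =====

-- B skips leading blank lines and takes the run of non-blank lines directly, instead of
-- accumulating all blank-delimited blocks and joining the first; simpler, same result.

-- ===== PORT A =====
-- loop state: (levels, current); Python's append is list ++ [x]
def pvStepA (st : List (List String) × List String) (line : String) : List (List String) × List String :=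
  if PySem.Str.strip line = "" then
    if st.2.isEmpty then st else (st.1 ++ [st.2], [])
  else (st.1, st.2 ++ [line])

-- trailing 'if current: levels.append(current)'
def pvFinA (st : List (List String) × List String) : List (List String) :=
  if st.2.isEmpty then st.1 else st.1 ++ [st.2]

def extract_first_level (level_lines : List String) : String :=
  let st := level_lines.foldl pvStepA ([], [])
  match pvFinA st with
  | [] => ""
  | l0 :: _ => PySem.Str.join "\n" l0

-- ===== PORT B =====
-- first while loop: advance past leading blank lines
def pvSkipBlank : List String → List String
  | [] => []
  | l :: rest => if PySem.Str.strip l = "" then pvSkipBlank rest else l :: rest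

-- second while loop: take the run of non-blank lines (level_lines[i:j])
def pvTakeBlock : List String → List String
  | [] => []
  | l :: rest => if PySem.Str.strip l = "" then [] else l :: pvTakeBlock rest

def extract_first_level_alt (level_lines : List String) : String :=
  PySem.Str.join "\n" (pvTakeBlock (pvSkipBlank level_lines))

-- ===== PRECONDITION & SPEC =====
def Spec_extract_first_level (level_lines : List String) (out : String) : Prop := out = extract_first_level_alt level_lines
instance (level_lines : List String) (out : String) : Decidable (Spec_extract_first_level level_lines out) := by unfold Spec_extract_first_level; infer_instance

-- ===== CLAIM (what is proved, stated in full; the proofs are below) =====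
def Claim_equal_extract_first_level : Prop := ∀ (level_lines : List String), Dom_extract_first_level level_lines → Spec_extract_first_level level_lines (extract_first_level level_lines)

-- ===== LEMMAS AND PROOFS =====

-- the result A extracts from a fold state
def pvResA (st : List (List String) × List String) : String :=
  match pvFinA st with
  | [] => ""
  | l0 :: _ => PySem.Str.join "\n" l0

-- once a level is closed, the first component's head never changes
theorem pvFold_fst_cons (ls : List String) (a : List String) (lv : List (List String))
    (c : List String) :
    ∃ lv' c', List.foldl pvStepA (a :: lv, c) ls = (a :: lv', c') := by
  induction ls generalizing lv c with
  | nil => exact ⟨lv, c, rfl⟩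
  | cons l rest ih =>
    simp only [List.foldl_cons, pvStepA]
    split_ifs with h1 h2
    · exact ih lv c
    · exact ih (lv ++ [c]) []
    · exact ih lv (c ++ [l])

theorem pvResA_closed (ls : List String) (a : List String) (lv : List (List String))
    (c : List String) :
    pvResA (List.foldl pvStepA (a :: lv, c) ls) = PySem.Str.join "\n" a := by
  obtain ⟨lv', c', h⟩ := pvFold_fst_cons ls a lv c
  rw [h]
  unfold pvResA pvFinA
  split_ifs <;> rfl

theorem pvTakeBlock_cons (l : String) (rest : List String) :
    pvTakeBlock (l :: rest) = if PySem.Str.strip l = "" then [] else l :: pvTakeBlock rest := rfl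

theorem pvSkipBlank_cons (l : String) (rest : List String) :
    pvSkipBlank (l :: rest) = if PySem.Str.strip l = "" then pvSkipBlank rest else l :: rest := rfl

-- while the current block is open (nonempty) and no level is closed yet
theorem pvResA_open (ls : List String) (c : List String) (hc : c ≠ []) :
    pvResA (List.foldl pvStepA ([], c) ls) = PySem.Str.join "\n" (c ++ pvTakeBlock ls) := by
  induction ls generalizing c with
  | nil =>
    unfold pvResA pvFinA pvTakeBlock
    simp [List.isEmpty_iff, hc]
  | cons l rest ih =>
    rw [List.foldl_cons, pvTakeBlock_cons]
    by_cases h1 : PySem.Str.strip l = ""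
    · have hs : pvStepA ([], c) l = (c :: [], []) := by
        simp [pvStepA, h1, List.isEmpty_iff, hc]
      rw [hs, pvResA_closed, if_pos h1, List.append_nil]
    · have hs : pvStepA ([], c) l = ([], c ++ [l]) := by
        simp [pvStepA, h1]
      rw [hs, ih (c ++ [l]) (by simp), if_neg h1]
      simp

theorem pvResA_eq_alt (ls : List String) :
    pvResA (List.foldl pvStepA ([], []) ls) = extract_first_level_alt ls := by
  induction ls with
  | nil => rfl
  | cons l rest ih =>
    rw [List.foldl_cons]
    by_cases h1 : PySem.Str.strip l = ""
    · have hs : pvStepA ([], []) l = ([], []) := by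
        simp [pvStepA, h1]
      rw [hs, ih]
      unfold extract_first_level_alt
      rw [pvSkipBlank_cons, if_pos h1]
    · have hs : pvStepA ([], []) l = ([], [l]) := by
        simp [pvStepA, h1]
      rw [hs, pvResA_open rest [l] (by simp)]
      unfold extract_first_level_alt
      rw [pvSkipBlank_cons, if_neg h1, pvTakeBlock_cons, if_neg h1, List.singleton_append]

-- ===== VERDICT (by name: the statement is the Claim_ definition above) =====
theorem extract_first_level_spec : Claim_equal_extract_first_level := by
  intro ls _
  show extract_first_level ls = extract_first_level_alt ls
  rw [← pvResA_eq_alt]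
  rfl
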